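-- pv_equiv track=rewrite | github.com/ikmartin/university-backup | code/ikmarti/ising/clustering/mathtools.py | ditri_array
-- ===== SOURCE A (Python) =====
-- def trinum(n):
--     return int(n * (n + 1) / 2)
--
-- def ditri_array(a: list, b: list):
--     """
--     Given two arrays (a,b) representing the diagonal and strict upper triangle of a
--     triangular matrix respectively, returns the array obtained by concatenating
--     row-wise and deleting zero entries.
--
--     Intended as a convenient way to represent parameter arrays (h,J) in the Ising model
--
--     Returns: array whose length is the nth triangular number where n = len(a)
--
--     Parameters
--       a (1D array): the diagonal
--       b (1D array): the upper triangle
--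
--     NOTE: the length of b must be the (n-1)th triangular number where a is the length of a
--     """
--     # ensure diag and triu are correct lengths
--     if len(b) != trinum(len(a) - 1):
--         raise TypeError(
--             "Expected len(b) = {}, got {} instead".format(len(b), trinum(len(a) - 1))
--         )
--
--     if (not isinstance(a, list)) or (not isinstance(b, list)):
--         raise TypeError("Parameters (a,b) must be lists!")
--
--     import itertools
--
--     # left and right slice for triu.
--     # in the upper triangular matrix
--     # the contribution of triu to row
--     # i is triu[x:x+d]
--     x = lambda N, i: trinum(N) - trinum(N - i) - i
--     d = lambda N, i: (N - 1) - i
--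
--     # fix the length of a
--     N = len(a)
--     return list(
--         itertools.chain.from_iterable(
--             [[a[i]] + b[x(N, i) : x(N, i) + d(N, i)] for i in range(N)]
--         )
--     )
-- ===== SOURCE B (Python) =====
-- def ditri_array(a: list, b: list):
--     if len(b) != (len(a) - 1) * len(a) // 2:
--         raise TypeError(
--             "Expected len(b) = {}, got {} instead".format(len(b), (len(a) - 1) * len(a) // 2)
--         )
--     if (not isinstance(a, list)) or (not isinstance(b, list)):
--         raise TypeError("Parameters (a,b) must be lists!")
--     N = len(a)
--     out = []
--     row = 0
--     left = 0
--     for v in b: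
--         if left == 0:
--             out.append(a[row])
--             left = N - 1 - row
--             row += 1
--         out.append(v)
--         left -= 1
--     out.extend(a[row:])
--     return out
-- ===== Notes on version B (the rewrite author's own statement) =====
-- stated objective: alternative
-- what changed: Replaces A's per-row construction (map over row indices producing [a[i]] + a closed-form trinum-offset slice of b, then chain-flatten) by a single flat element-wise pass over b with a countdown of elements left in the current row, inserting the next diagonal entry whenever the countdown hits zero; no slicing or offset arithmetic at all.
import Mathlib
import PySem

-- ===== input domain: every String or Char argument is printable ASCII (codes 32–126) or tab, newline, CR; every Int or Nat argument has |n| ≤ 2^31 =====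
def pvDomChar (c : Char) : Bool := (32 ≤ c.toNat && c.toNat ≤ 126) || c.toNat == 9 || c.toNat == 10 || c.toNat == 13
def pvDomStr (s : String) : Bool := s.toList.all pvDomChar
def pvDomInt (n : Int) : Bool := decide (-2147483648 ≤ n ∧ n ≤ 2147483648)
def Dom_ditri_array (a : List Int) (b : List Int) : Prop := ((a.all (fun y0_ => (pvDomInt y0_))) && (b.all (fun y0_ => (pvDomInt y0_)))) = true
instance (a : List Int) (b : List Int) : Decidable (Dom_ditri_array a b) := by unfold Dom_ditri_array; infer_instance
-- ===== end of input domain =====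

-- B replaces A's per-row map with trinum-offset slices by one flat element-wise pass
-- over b with a countdown, inserting diagonal entries at row boundaries (objective: alternative).

-- ===== PORT A =====
-- trinum(n) = int(n*(n+1)/2); exact as floor division since n*(n+1) is even and ≥ 0
def trinumA (n : Int) : Int := PySem.Int.floordiv (n * (n + 1)) 2

def ditri_array (a : List Int) (b : List Int) : List Int :=
  -- Python raises TypeError when the length guard fails; those inputs are outside Pre_
  if (b.length : Int) ≠ trinumA ((a.length : Int) - 1) then []
  else
    let x : Int → Int → Int := fun N i => trinumA N - trinumA (N - i) - i
    let d : Int → Int → Int := fun N i => (N - 1) - i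
    let N : Int := (a.length : Int)
    ((PySem.List.pyRange 0 N 1).map (fun i =>
        [(PySem.List.pyGet? a i).getD 0]
          ++ PySem.List.slice b (some (x N i)) (some (x N i + d N i)))).flatten

-- ===== PORT B =====
-- the body of Source B's `for v in b` loop: state = (out, row, left)
def bstep (a : List Int) (N : Int) (s : List Int × Int × Int) (v : Int) :
    List Int × Int × Int :=
  let s := if s.2.2 == 0 then
      (s.1 ++ [(PySem.List.pyGet? a s.2.1).getD 0], s.2.1 + 1, N - 1 - s.2.1)
    else s
  (s.1 ++ [v], s.2.1, s.2.2 - 1)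

def ditri_array_alt (a : List Int) (b : List Int) : List Int :=
  -- Source B raises TypeError when the length guard fails; those inputs are outside Pre_
  if (b.length : Int) ≠ PySem.Int.floordiv (((a.length : Int) - 1) * (a.length : Int)) 2 then []
  else
    let N : Int := (a.length : Int)
    let s := b.foldl (bstep a N) ([], 0, 0)
    s.1 ++ PySem.List.slice a (some s.2.1) none

-- ===== PRECONDITION & SPEC =====
-- Pre_ excludes exactly the inputs on which A raises TypeError (len(b) ≠ trinum(len(a)-1)).
def Pre_ditri_array (a : List Int) (b : List Int) : Prop :=
  2 * (b.length : Int) = ((a.length : Int) - 1) * (a.length : Int)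
instance (a : List Int) (b : List Int) : Decidable (Pre_ditri_array a b) := by
  unfold Pre_ditri_array; infer_instance
def pvWitness_ditri_array : List Int × List Int := ([1, 2, 3], [4, 5, 6])

def Spec_ditri_array (a : List Int) (b : List Int) (out : List Int) : Prop := out = ditri_array_alt a b
instance (a : List Int) (b : List Int) (out : List Int) : Decidable (Spec_ditri_array a b out) := by
  unfold Spec_ditri_array; infer_instance

-- ===== CLAIM =====
def Claim_equal_ditri_array : Prop := ∀ (a : List Int) (b : List Int), Dom_ditri_array a b → Pre_ditri_array a b → Spec_ditri_array a b (ditri_array a b)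

-- ===== LEMMAS AND PROOFS =====

-- canonical row-wise result: k rows starting at row index r, first b-chunk length k-1
def rowsc (a : List Int) : Nat → Int → List Int → List Int
  | 0, _, _ => []
  | k+1, r, b => ((PySem.List.pyGet? a r).getD 0 :: b.take k) ++ rowsc a k (r+1) (b.drop k)

-- the rows produced inside B's loop: k rows starting at r, first b-chunk length k
def rowsb (a : List Int) : Nat → Int → List Int → List Int
  | 0, _, _ => []
  | k+1, r, b => ((PySem.List.pyGet? a r).getD 0 :: b.take (k+1)) ++ rowsb a k (r+1) (b.drop (k+1))

lemma trinum_diff (k : Int) : trinumA k - trinumA (k - 1) = k := by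
  obtain ⟨c, hc⟩ := Int.even_mul_succ_self k
  obtain ⟨d, hd⟩ := Int.even_mul_succ_self (k - 1)
  have hd' : (k - 1) * k = d + d := by linear_combination hd
  unfold trinumA
  rw [PySem.Int.floordiv_eq_ediv_of_pos (by omega), PySem.Int.floordiv_eq_ediv_of_pos (by omega)]
  have h2 : c + c - (d + d) = k + k := by rw [← hc, ← hd']; ring
  rw [hc, hd]
  omega

lemma trinum_of_double (L : Int) (k : Int) (h : k * (k + 1) = 2 * L) :
    trinumA k = L := by
  unfold trinumA
  rw [PySem.Int.floordiv_eq_ediv_of_pos (by omega), h]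
  omega

-- A's map-of-slices equals the canonical row-wise function
lemma Aeq (a b : List Int) : ∀ (k r o : Nat), r + k = a.length →
    (o : Int) = trinumA (a.length : Int) - trinumA ((a.length : Int) - (r : Int)) - (r : Int) →
    ((PySem.List.pyRange (r : Int) (a.length : Int) 1).map (fun i =>
        [(PySem.List.pyGet? a i).getD 0]
          ++ PySem.List.slice b (some (trinumA (a.length : Int) - trinumA ((a.length : Int) - i) - i))
              (some (trinumA (a.length : Int) - trinumA ((a.length : Int) - i) - i
                      + ((a.length : Int) - 1 - i))))).flatten
      = rowsc a k (r : Int) (b.drop o) := by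
  intro k
  induction k with
  | zero =>
    intro r o hr _
    rw [PySem.List.pyRange_one_eq_nil (by omega)]
    simp [rowsc]
  | succ k ih =>
    intro r o hr ho
    rw [PySem.List.pyRange_one_cons (by omega)]
    rw [List.map_cons, List.flatten_cons]
    have hd : (a.length : Int) - 1 - (r : Int) = (k : Int) := by omega
    have hstep : trinumA ((a.length : Int) - (r : Int))
        - trinumA ((a.length : Int) - (r : Int) - 1) = (a.length : Int) - (r : Int) :=
      trinum_diff _
    have ho' : ((o + k : Nat) : Int)
        = trinumA (a.length : Int) - trinumA ((a.length : Int) - ((r + 1 : Nat) : Int))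
            - ((r + 1 : Nat) : Int) := by
      push_cast
      have he : (a.length : Int) - (r : Int) - 1 = (a.length : Int) - ((r : Int) + 1) := by ring
      rw [← he]
      omega
    have hcast : ((r : Int) + 1) = (((r + 1 : Nat)) : Int) := by push_cast; ring
    rw [← ho, hd, PySem.List.slice_natCast_add]
    rw [hcast, ih (r + 1) (o + k) (by omega) ho']
    show (((PySem.List.pyGet? a (r : Int)).getD 0 :: (b.drop o).take k)
        ++ rowsc a k ((r + 1 : Nat) : Int) (b.drop (o + k)))
      = rowsc a (k + 1) (r : Int) (b.drop o)
    rw [rowsc]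
    have hdd : (b.drop o).drop k = b.drop (o + k) := by
      simp [List.drop_drop, Nat.add_comm]
    rw [hdd, hcast]

-- the loop body appends elements unchanged while the countdown is positive
lemma consume (a : List Int) (N : Int) : ∀ (seg out : List Int) (row c : Int),
    (seg.length : Int) ≤ c →
    List.foldl (bstep a N) (out, row, c) seg = (out ++ seg, row, c - seg.length) := by
  intro seg
  induction seg with
  | nil => intro out row c _; simp
  | cons v t ih =>
    intro out row c hc
    have hne : (c == 0) = false := by
      simp only [List.length_cons] at hc
      have : ¬ c = 0 := by push_cast at hc; omega
      simpa using this
    rw [List.foldl_cons]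
    show List.foldl (bstep a N) (bstep a N (out, row, c) v) t = _
    rw [show bstep a N (out, row, c) v = (out ++ [v], row, c - 1) by
      simp [bstep, hne]]
    rw [ih (out ++ [v]) row (c - 1) (by simp at hc ⊢; omega)]
    simp only [List.length_cons]
    refine Prod.ext (by simp) ?_
    refine Prod.ext rfl ?_
    push_cast
    show c - 1 - (t.length : Int) = c - ((t.length : Int) + 1)
    ring

-- B's fold over b, started at a fresh row, produces the loop rows
lemma Bmain (a : List Int) (N : Int) : ∀ (k : Nat) (out b' : List Int) (r : Int),
    (b'.length : Int) * 2 = (k : Int) * ((k : Int) + 1) →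
    (k : Int) = N - 1 - r →
    List.foldl (bstep a N) (out, r, 0) b' = (out ++ rowsb a k r b', r + (k : Int), 0) := by
  intro k
  induction k with
  | zero =>
    intro out b' r hlen _
    have : b' = [] := by
      have : b'.length = 0 := by push_cast at hlen; omega
      exact List.eq_nil_of_length_eq_zero this
    subst this
    simp [rowsb]
  | succ k ih =>
    intro out b' r hlen hk
    push_cast at hk
    obtain ⟨v, t, rfl⟩ : ∃ v t, b' = v :: t := by
      cases b' with
      | nil =>
        exfalso
        simp only [List.length_nil] at hlen
        push_cast at hlen
        nlinarith [Int.natCast_nonneg k]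
      | cons v t => exact ⟨v, t, rfl⟩
    have hlen' : ((t.length : Int) + 1) * 2 = ((k : Int) + 1) * ((k : Int) + 2) := by
      simp only [List.length_cons] at hlen
      push_cast at hlen
      linear_combination hlen
    have hkt' : (k : Int) ≤ (t.length : Int) := by
      nlinarith [Int.natCast_nonneg k, Int.natCast_nonneg t.length, sq_nonneg ((k : Int))]
    have hkt : k ≤ t.length := by exact_mod_cast hkt'
    have htk : (t.take k).length = k := by simp; omega
    have hdlen : ((t.drop k).length : Int) * 2 = (k : Int) * ((k : Int) + 1) := by
      rw [List.length_drop, Nat.cast_sub hkt]; linear_combination hlen'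
    rw [List.foldl_cons]
    rw [show bstep a N (out, r, 0) v
        = (out ++ [(PySem.List.pyGet? a r).getD 0] ++ [v], r + 1, N - 1 - r - 1) by
      simp [bstep]]
    have hsplit : List.foldl (bstep a N)
        (out ++ [(PySem.List.pyGet? a r).getD 0] ++ [v], r + 1, N - 1 - r - 1) t
        = (out ++ [(PySem.List.pyGet? a r).getD 0] ++ [v] ++ t.take k
            ++ rowsb a k (r + 1) (t.drop k), r + 1 + (k : Int), 0) := by
      conv_lhs => rw [← List.take_append_drop k t]
      rw [List.foldl_append]
      rw [consume a N (t.take k) _ (r + 1) (N - 1 - r - 1) (by rw [htk]; omega)]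
      rw [htk]
      rw [show (N - 1 - r - 1 : Int) - (k : Int) = 0 by omega]
      rw [ih _ (t.drop k) (r + 1) hdlen (by omega)]
    rw [hsplit, rowsb]
    refine Prod.ext ?_ (Prod.ext (by push_cast; ring) rfl)
    simp [List.append_assoc]

-- rowsc = rowsb plus the trailing diagonal entry
lemma rowsc_eq_rowsb (a : List Int) : ∀ (m : Nat) (r : Int) (b : List Int),
    rowsc a (m + 1) r b = rowsb a m r b ++ [(PySem.List.pyGet? a (r + (m : Int))).getD 0] := by
  intro m
  induction m with
  | zero => intro r b; simp [rowsc, rowsb]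
  | succ m ih =>
    intro r b
    rw [rowsc, rowsb, ih (r + 1) (b.drop (m + 1))]
    have : r + 1 + (m : Int) = r + ((m + 1 : Nat) : Int) := by push_cast; ring
    rw [this]
    simp [List.append_assoc]

-- ===== VERDICT =====
theorem ditri_array_spec : Claim_equal_ditri_array := by
  intro a b _hDom hPre
  unfold Pre_ditri_array at hPre
  unfold Spec_ditri_array ditri_array ditri_array_alt
  have hA : (b.length : Int) = trinumA ((a.length : Int) - 1) := by
    refine (trinum_of_double (b.length : Int) _ ?_).symm
    linear_combination -hPre
  have hB : (b.length : Int)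
      = PySem.Int.floordiv (((a.length : Int) - 1) * (a.length : Int)) 2 := by
    rw [PySem.Int.floordiv_eq_ediv_of_pos (by omega), ← hPre]; omega
  rw [if_neg (by omega), if_neg (by omega)]
  simp only []
  have hAside := Aeq a b a.length 0 0 (by omega) (by simp)
  simp only [Nat.cast_zero, List.drop_zero] at hAside
  rw [hAside]
  cases hn : a.length with
  | zero =>
    have ha : a = [] := List.eq_nil_of_length_eq_zero hn
    have hb : b = [] := by
      rw [hn] at hPre
      have : b.length = 0 := by push_cast at hPre; omega
      exact List.eq_nil_of_length_eq_zero this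
    subst ha; subst hb
    simp [rowsc, PySem.List.slice]
  | succ m =>
    have hfold := Bmain a (((m + 1 : Nat)) : Int) m [] b 0
      (by rw [hn] at hPre; push_cast at hPre ⊢; linear_combination hPre)
      (by push_cast; ring)
    rw [hfold]
    simp only [List.nil_append, zero_add]
    have hm : m < a.length := by omega
    have hdrop : a.drop m = [a[m]] := by
      rw [List.drop_eq_getElem_cons hm]
      have h2 : a.drop (m + 1) = [] := by
        apply List.drop_eq_nil_of_le; omega
      rw [h2]
    rw [rowsc_eq_rowsb a m 0 b, PySem.List.slice_from_natCast, hdrop]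
    simp [PySem.List.pyGet?_natCast, List.getElem?_eq_getElem hm]
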